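-- pv_equiv track=rewrite | github.com/DJ-Greenwood/Zero-Run-Length-Bound-Theorem | number-analysis/Code/validate_theorem.py | find_zero_runs
-- ===== SOURCE A (Python) =====
-- from typing import Tuple, List, Dict, Optional
--
-- def find_zero_runs(binary: List[int]) -> List[Tuple[int, int]]:
--     """
--     Find all zero runs in a binary sequence.
--     Returns: List of tuples (starting_position, length) for each zero run
--     """
--     runs = []
--     current_run = 0
--     start_position = None
--
--     for i, bit in enumerate(binary):
--         if bit == 0:
--             if start_position is None:
--                 start_position = i
--             current_run += 1
--         else:
--             if current_run > 0:
--                 runs.append((start_position, current_run))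
--             current_run = 0
--             start_position = None
--
--     if current_run > 0:
--         runs.append((start_position, current_run))
--
--     return runs
-- ===== SOURCE B (Python) =====
-- def find_zero_runs(binary):
--     """Span-based scan: jump over each maximal zero block in one step."""
--     runs = []
--     i = 0
--     n = len(binary)
--     while i < n:
--         if binary[i] == 0:
--             j = i + 1
--             while j < n and binary[j] == 0:
--                 j += 1
--             runs.append((i, j - i))
--             i = j
--         else:
--             i += 1
--     return runs
-- ===== Notes on version B (the rewrite author's own statement) =====
-- stated objective: alternative
-- what changed: A is a one-bit-at-a-time state machine carrying (current_run, start_position, pending-flush) state; B is a stateless span-based scan that, on hitting a zero, measures the whole maximal zero block at once, appends (start, length) and jumps past it, so no run state or final flush exists.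
import Mathlib
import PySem

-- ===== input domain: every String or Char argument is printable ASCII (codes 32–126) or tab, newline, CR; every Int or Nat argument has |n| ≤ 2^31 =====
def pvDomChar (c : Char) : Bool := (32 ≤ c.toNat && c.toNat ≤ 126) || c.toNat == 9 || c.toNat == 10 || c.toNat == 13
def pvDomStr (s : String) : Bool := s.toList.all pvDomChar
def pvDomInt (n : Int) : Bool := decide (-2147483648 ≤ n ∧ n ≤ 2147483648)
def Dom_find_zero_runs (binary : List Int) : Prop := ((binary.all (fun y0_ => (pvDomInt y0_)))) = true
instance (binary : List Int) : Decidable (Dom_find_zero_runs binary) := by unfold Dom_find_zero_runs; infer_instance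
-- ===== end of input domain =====

-- B replaces A's bit-at-a-time state machine (current_run/start_position/final flush) by a
-- stateless span-based scan that measures each maximal zero block at once; return values equal.

-- ===== PORT A =====
-- one loop step of A: state = (runs, current_run, start_position); p = (i, bit)
def pvAStep (st : List (Int × Int) × Int × Option Int) (p : Int × Int) :
    List (Int × Int) × Int × Option Int :=
  if p.2 == 0 then
    (st.1, st.2.1 + 1, match st.2.2 with | none => some p.1 | some s => some s)
  else
    (if st.2.1 > 0 then st.1 ++ [(st.2.2.getD 0, st.2.1)] else st.1, 0, none)
    -- start_position is always `some` when current_run > 0, so `.getD 0` is never read as 0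

-- the trailing `if current_run > 0: runs.append(...)` of A
def pvAFinish (st : List (Int × Int) × Int × Option Int) : List (Int × Int) :=
  if st.2.1 > 0 then st.1 ++ [(st.2.2.getD 0, st.2.1)] else st.1

def find_zero_runs (binary : List Int) : List (Int × Int) :=
  pvAFinish ((PySem.List.enumerate binary 0).foldl pvAStep ([], 0, none))

-- ===== PORT B =====
-- inner while loop of B: length of the maximal leading zero block
def pvLeadZeros : List Int → Nat
  | [] => 0
  | b :: rest => if b == 0 then pvLeadZeros rest + 1 else 0

-- outer while loop of B: on a zero, record the whole block and jump past it
def pvAltGo : List Int → Int → List (Int × Int)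
  | [], _ => []
  | b :: rest, pos =>
    if b == 0 then
      (pos, ((pvLeadZeros rest : Int) + 1)) ::
        pvAltGo (rest.drop (pvLeadZeros rest)) (pos + (pvLeadZeros rest : Int) + 1)
    else
      pvAltGo rest (pos + 1)
termination_by l _ => l.length
decreasing_by
  · simp [List.length_drop]
  · simp

def find_zero_runs_alt (binary : List Int) : List (Int × Int) :=
  pvAltGo binary 0

-- ===== PRECONDITION & SPEC =====
def Spec_find_zero_runs (binary : List Int) (out : List (Int × Int)) : Prop := out = find_zero_runs_alt binary
instance (binary : List Int) (out : List (Int × Int)) : Decidable (Spec_find_zero_runs binary out) := by unfold Spec_find_zero_runs; infer_instance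

-- ===== CLAIM (what is proved, stated in full; the proofs are below) =====
def Claim_equal_find_zero_runs : Prop := ∀ (binary : List Int), Dom_find_zero_runs binary → Spec_find_zero_runs binary (find_zero_runs binary)

-- ===== LEMMAS AND PROOFS =====

-- Joint loop invariant: running A's loop from a "clean" state yields B's span scan;
-- from a mid-run state (current_run = c > 0, start = s) it yields (s, c + leading zeros)
-- followed by B's scan of the remainder.
theorem pv_main (l : List Int) :
    (∀ (i : Int) (acc : List (Int × Int)),
        pvAFinish ((PySem.List.enumerate l i).foldl pvAStep (acc, 0, none))
          = acc ++ pvAltGo l i)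
    ∧ (∀ (i s c : Int) (acc : List (Int × Int)), 0 < c →
        pvAFinish ((PySem.List.enumerate l i).foldl pvAStep (acc, c, some s))
          = acc ++ (s, c + (pvLeadZeros l : Int)) ::
              pvAltGo (l.drop (pvLeadZeros l)) (i + (pvLeadZeros l : Int))) := by
  induction l with
  | nil =>
    constructor
    · intro i acc
      simp [PySem.List.enumerate_nil, pvAFinish, pvAltGo]
    · intro i s c acc hc
      simp [PySem.List.enumerate_nil, pvAFinish, pvAltGo, pvLeadZeros, hc]
  | cons b rest ih =>
    constructor
    · intro i acc
      by_cases hb : b = 0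
      · subst hb
        rw [PySem.List.enumerate_cons]
        simp only [List.foldl_cons, pvAStep]
        simp only [beq_self_eq_true, if_true]
        rw [show (0:Int) + 1 = 1 from by ring]
        rw [(ih.2) (i + 1) i 1 acc (by omega)]
        simp only [pvAltGo, beq_self_eq_true, if_true]
        have : (i + 1 + (pvLeadZeros rest : Int)) = i + (pvLeadZeros rest : Int) + 1 := by ring
        rw [this, show (1:Int) + (pvLeadZeros rest : Int) = (pvLeadZeros rest : Int) + 1 from by ring]
      · rw [PySem.List.enumerate_cons]
        simp only [List.foldl_cons, pvAStep]
        have hb' : (b == 0) = false := by simp [hb]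
        simp only [hb', Bool.false_eq_true, if_false, gt_iff_lt, lt_self_iff_false]
        rw [(ih.1) (i + 1) acc]
        simp [pvAltGo, hb]
    · intro i s c acc hc
      by_cases hb : b = 0
      · subst hb
        rw [PySem.List.enumerate_cons]
        simp only [List.foldl_cons, pvAStep]
        simp only [beq_self_eq_true, if_true]
        rw [(ih.2) (i + 1) s (c + 1) acc (by omega)]
        simp only [pvLeadZeros, beq_self_eq_true, if_true, List.drop_succ_cons]
        congr 2
        · push_cast; ring_nf
        · push_cast; ring_nf
      · rw [PySem.List.enumerate_cons]
        simp only [List.foldl_cons, pvAStep]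
        have hb' : (b == 0) = false := by simp [hb]
        simp only [hb', Bool.false_eq_true, if_false, Option.getD_some]
        rw [if_pos hc]
        rw [(ih.1) (i + 1) (acc ++ [(s, c)])]
        have hlz : pvLeadZeros (b :: rest) = 0 := by simp [pvLeadZeros, hb]
        rw [hlz]
        simp only [List.drop_zero, Nat.cast_zero, add_zero]
        rw [List.append_assoc]
        congr 1
        simp [pvAltGo, hb]

-- ===== VERDICT (by name: the statement is the Claim_ definition above) =====
theorem find_zero_runs_spec : Claim_equal_find_zero_runs := by
  intro binary _
  unfold Spec_find_zero_runs find_zero_runs find_zero_runs_alt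
  simpa using (pv_main binary).1 0 []
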